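/- GENERATED by farm/mkstatement.py from design/units.tsv (unit `start_decoder.F6c`) and the assertions of Vorbis/Spec/StartDecoderF6.lean — do not edit.
   THE STATEMENT of the proof unit `start_decoder.F6c`: segment F6c of `start_decoder` (22 instructions; entries 0x11579e;
   exits 0x113b22,0x11579e,0x115809; ranges 0x11579e-0x115804)
   takes each of its entry assertions to one of its exit assertions (`Vorbis.Spec.StartDecoder.SegF6c`), given the contracts of its callees.
   What the names mean: Vorbis/Spec/Basic.lean (the shared hypotheses), Vorbis/Spec/StartDecoderF6.lean (the assertions). The theorem to prove:
   `theorem start_decoder_F6c_ok : Vorbis.Spec.start_decoder_F6c.Statement`. -/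
import Vorbis.Spec.Leaves
import Vorbis.Spec.StartDecoderF6
namespace Vorbis.Spec.start_decoder_F6c
open X86 X86.User Asan

/-- The statement of unit `start_decoder.F6c`. -/
def Statement : Prop :=
  ∀ (Lay : Layout) (_hLay : Lay.hi = 0x1000000) (μ : Microarch) (_hμ : UserX.MicroOK μ) (u₀ : State)
    (_hcode : HasCodeNat Lay u₀ Vorbis.L.start_decoder.entry Vorbis.Code.code_start_decoder.nat Vorbis.L.start_decoder.size)
    (_h_asan_load2_noabort : Asan.SmallCheck Lay μ Vorbis.WayInv (Vorbis.CodeOK u₀) [.rax, .rcx, .rdx] 2 Vorbis.L.__asan_load2_noabort.entry)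
    (_h_asan_load4_noabort : Asan.SmallCheck Lay μ Vorbis.WayInv (Vorbis.CodeOK u₀) [.rax, .rcx, .rdx] 4 Vorbis.L.__asan_load4_noabort.entry)
    (_h_error : ∀ (others : List Obj) (frames : List (Nat × FrameLayout)), Calls Lay μ Vorbis.WayInv (Vorbis.conv u₀) Vorbis.L.error.entry (Vorbis.Spec.error.spec others frames)),
    Vorbis.Spec.StartDecoder.SegF6c Lay μ u₀

end Vorbis.Spec.start_decoder_F6c
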